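-- pv_equiv track=rewrite | github.com/eguinosa/topics-cord19 | doc_tokenizers.py | _is_alpha_numeric
-- ===== SOURCE A (Python) =====
-- def _is_alpha_numeric(word: str):
--     """
--     Check if the string 'word' is alphanumeric. Underscores (_) and dots (.) are
--     accepted inside the word, they need to have letters between them to be
--     accepted (OK: AVI.C.D_03, No: AVI..C__D03)
--
--     Args:
--         word: A string with the word we want to check.
--
--     Returns:
--         True, if we have an alphanumeric 'word'.
--     """
--     # Check it starts letter.
--     if not word[0].isalpha():
--         return False
--
--     # Create word segments.
--     word_segments = [word]
--
--     # Check if it contains underscores (_).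
--     new_segments = []
--     for word_section in word_segments:
--         section_tokens = word_section.split('_')
--         for section_token in section_tokens:
--             if section_token:
--                 new_segments.append(section_token)
--             else:
--                 # Empty Section between underscores.
--                 return False
--     # Save the new Word Segments without underscores.
--     word_segments = new_segments
--
--     # Check if it contains periods (.)
--     new_segments = []
--     for word_section in word_segments:
--         section_tokens = word_section.split('.')
--         for section_token in section_tokens:
--             if section_token:
--                 new_segments.append(section_token)
--             else:
--                 # Empty Section between periods.
--                 return False
--     # Save the new Word Segments without underscores.
--     word_segments = new_segments
--
--     # Check all the segments are alphanumeric.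
--     for word_section in word_segments:
--         if word_section.isalnum():
--             continue
--         else:
--             # Section not alphanumeric found.
--             return False
--
--     # We have an alphanumeric 'word'.
--     return True
-- ===== SOURCE B (Python) =====
-- def _is_alpha_numeric(word: str):
--     """
--     Check if the string 'word' is alphanumeric. Underscores (_) and dots (.)
--     are accepted inside the word when surrounded by alphanumeric characters.
--     Single state-machine pass instead of the two split-based passes.
--     """
--     # Check it starts with a letter (raises IndexError on an empty string like the original).
--     if not word[0].isalpha():
--         return False
--
--     prev_was_sep = False
--     for c in word:
--         if c == '_' or c == '.':
--             if prev_was_sep: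
--                 # Two separators in a row.
--                 return False
--             prev_was_sep = True
--         elif not c.isalnum():
--             # Character neither alphanumeric nor a separator.
--             return False
--         else:
--             prev_was_sep = False
--
--     # A trailing separator is not allowed.
--     return not prev_was_sep
-- ===== Notes on version B (the rewrite author's own statement) =====
-- stated objective: alternative
-- what changed: Replaces the two split-based passes (split on underscore, then split each piece on dot, collect segments, then check each segment with isalnum) by a single state-machine scan over the characters carrying one boolean flag that records whether the previous character was a separator.
import Mathlib
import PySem

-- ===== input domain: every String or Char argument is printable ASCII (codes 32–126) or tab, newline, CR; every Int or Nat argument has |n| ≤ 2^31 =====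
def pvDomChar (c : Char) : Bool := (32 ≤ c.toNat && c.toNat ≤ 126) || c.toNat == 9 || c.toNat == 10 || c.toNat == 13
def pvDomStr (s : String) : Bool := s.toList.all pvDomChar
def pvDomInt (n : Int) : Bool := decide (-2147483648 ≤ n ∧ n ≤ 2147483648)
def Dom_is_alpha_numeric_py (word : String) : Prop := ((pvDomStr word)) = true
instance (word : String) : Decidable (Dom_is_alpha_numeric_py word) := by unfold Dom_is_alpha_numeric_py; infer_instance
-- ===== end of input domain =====

-- B replaces A's two split-based passes by a single state-machine scan over the characters.

-- ===== PORT A =====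
-- inner loop of A: append each non-empty token, early return (none) on an empty one
def pvInner (acc : List (List Char)) : List (List Char) → Option (List (List Char))
  | [] => some acc
  | t :: ts => if t.isEmpty then none else pvInner (acc ++ [t]) ts

-- outer loop of one separator pass of A, threading the new_segments accumulator
def pvPass (sep : Char) (acc : List (List Char)) : List (List Char) → Option (List (List Char))
  | [] => some acc
  | sec :: rest =>
    match pvInner acc (PySem.Chars.splitOn sec [sep]) with
    | none => none
    | some acc' => pvPass sep acc' rest

def is_alpha_numeric_py (word : String) : Bool :=
  -- indexing the first character raises IndexError on the empty string; Pre_ excludes it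
  match PySem.Str.pyGet? word 0 with
  | none => false
  | some c0 =>
    if !PySem.Chars.isalpha c0 then false
    else
      match pvPass '_' [] [word.toList] with
      | none => false
      | some segs1 =>
        match pvPass '.' [] segs1 with
        | none => false
        | some segs2 => segs2.all (fun s => PySem.Chars.strIsalnum s)

-- ===== PORT B =====
-- single pass; prev records whether the previous character was a separator
def pvScan : Bool → List Char → Bool
  | prev, [] => !prev
  | prev, c :: rest =>
    if c == '_' || c == '.' then
      if prev then false else pvScan true rest
    else if !PySem.Chars.isalnum c then false
    else pvScan false rest

def is_alpha_numeric_py_alt (word : String) : Bool :=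
  -- same first-character guard as A (IndexError on the empty string; Pre_ excludes it)
  match PySem.Str.pyGet? word 0 with
  | none => false
  | some c0 =>
    if !PySem.Chars.isalpha c0 then false
    else pvScan false word.toList

-- ===== PRECONDITION & SPEC =====
-- Pre_ excludes only the empty string, on which both A and B raise IndexError when indexing the first character.
def Pre_is_alpha_numeric_py (word : String) : Prop := word ≠ ""
instance (word : String) : Decidable (Pre_is_alpha_numeric_py word) := by unfold Pre_is_alpha_numeric_py; infer_instance
def pvWitness_is_alpha_numeric_py : String := "a"
def Spec_is_alpha_numeric_py (word : String) (out : Bool) : Prop := out = is_alpha_numeric_py_alt word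
instance (word : String) (out : Bool) : Decidable (Spec_is_alpha_numeric_py word out) := by unfold Spec_is_alpha_numeric_py; infer_instance

-- ===== CLAIM (what is proved, stated in full; the proofs are below) =====
def Claim_equal_is_alpha_numeric_py : Prop := ∀ (word : String), Dom_is_alpha_numeric_py word → Pre_is_alpha_numeric_py word → Spec_is_alpha_numeric_py word (is_alpha_numeric_py word)

-- ===== LEMMAS AND PROOFS =====

-- Python-style split on a separator predicate ('' gives ['']); both ports are reduced to it.
def pvSplitP (P : Char → Bool) : List Char → List (List Char)
  | [] => [[]]
  | c :: t =>
    if P c then [] :: pvSplitP P t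
    else
      match pvSplitP P t with
      | [] => [[c]]
      | h :: r => (c :: h) :: r

theorem pvSplitP_ne_nil (P : Char → Bool) (cs : List Char) : pvSplitP P cs ≠ [] := by
  cases cs with
  | nil => simp [pvSplitP]
  | cons c t => simp only [pvSplitP]; split; · simp
                split <;> simp

def pvConsHead (x : List Char) : List (List Char) → List (List Char)
  | [] => [x]
  | h :: r => (x ++ h) :: r

theorem pvSplitOn_go_eq (s : Char) (fuel : Nat) :
    ∀ (l cur : List Char) (acc : List (List Char)), l.length ≤ fuel →
      PySem.Chars.splitOn.go [s] fuel l cur acc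
        = acc.reverse ++ pvConsHead cur.reverse (pvSplitP (· == s) l) := by
  induction fuel with
  | zero =>
    intro l cur acc h
    have : l = [] := List.eq_nil_of_length_eq_zero (Nat.le_zero.mp h)
    subst this
    simp [PySem.Chars.splitOn.go, pvSplitP, pvConsHead]
  | succ n ih =>
    intro l cur acc h
    cases l with
    | nil => simp [PySem.Chars.splitOn.go, pvSplitP, pvConsHead]
    | cons c rest =>
      simp only [PySem.Chars.splitOn.go]
      by_cases hc : s = c
      · have hp : [s].isPrefixOf (c :: rest) = true := by simp [List.isPrefixOf, hc]
        rw [if_pos hp]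
        simp only [List.length_cons, List.length_nil, List.drop_succ_cons, List.drop_zero]
        rw [ih rest [] (cur.reverse :: acc) (by simpa using Nat.lt_succ_iff.mp (by simpa using h))]
        cases hc
        rcases h' : pvSplitP (· == s) rest with _ | ⟨hh, r⟩
        · exact absurd h' (pvSplitP_ne_nil _ _)
        · simp [pvSplitP, pvConsHead, h']
      · have hp : [s].isPrefixOf (c :: rest) = false := by simp [List.isPrefixOf, hc]
        rw [if_neg (by simp [hp])]
        rw [ih rest (c :: cur) acc (by simpa using Nat.lt_succ_iff.mp (by simpa using h))]
        have hcc : (c == s) = false := by simp; exact fun e => hc e.symm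
        simp only [pvSplitP, hcc, Bool.false_eq_true, if_false]
        rcases h' : pvSplitP (· == s) rest with _ | ⟨hh, r⟩
        · exact absurd h' (pvSplitP_ne_nil _ _)
        · simp [pvConsHead]

theorem pvSplitOn_eq (s : Char) (cs : List Char) :
    PySem.Chars.splitOn cs [s] = pvSplitP (· == s) cs := by
  unfold PySem.Chars.splitOn
  rw [pvSplitOn_go_eq s (cs.length + 1) cs [] [] (by omega)]
  rcases h : pvSplitP (· == s) cs with _ | ⟨hh, r⟩
  · exact absurd h (pvSplitP_ne_nil _ _)
  · simp [pvConsHead]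

-- splitting on P and then each piece on Q is one split on (P or Q)
theorem pvSplitP_flatMap (P Q : Char → Bool) (cs : List Char) :
    (pvSplitP P cs).flatMap (pvSplitP Q) = pvSplitP (fun c => P c || Q c) cs := by
  induction cs with
  | nil => simp [pvSplitP]
  | cons c t ih =>
    by_cases hP : P c
    · simp only [pvSplitP, hP, Bool.true_or, if_true, List.flatMap_cons]
      simp [ih]
    · rcases h1 : pvSplitP P t with _ | ⟨h, r⟩
      · exact absurd h1 (pvSplitP_ne_nil _ _)
      by_cases hQ : Q c
      · simp only [pvSplitP, hP, hQ, Bool.false_or, if_true, Bool.false_eq_true, if_false, h1,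
          List.flatMap_cons]
        show _ = [] :: pvSplitP (fun c => P c || Q c) t
        rw [List.cons_append, ← List.flatMap_cons]
        rw [← h1, ih]
      · rcases h2 : pvSplitP Q h with _ | ⟨h', r'⟩
        · exact absurd h2 (pvSplitP_ne_nil _ _)
        have key : pvSplitP (fun c => P c || Q c) t = h' :: (r' ++ r.flatMap (pvSplitP Q)) := by
          rw [← ih, h1, List.flatMap_cons, h2, List.cons_append]
        simp only [pvSplitP, hP, hQ, Bool.false_or, Bool.false_eq_true, if_false, h1,
          List.flatMap_cons, h2, key, List.cons_append]

theorem pvInner_eq (toks : List (List Char)) : ∀ acc,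
    pvInner acc toks = if toks.all (fun t => !t.isEmpty) then some (acc ++ toks) else none := by
  induction toks with
  | nil => intro acc; simp [pvInner]
  | cons t ts ih =>
    intro acc
    by_cases h : t.isEmpty
    · simp [pvInner, h]
    · simp only [pvInner, h, Bool.false_eq_true, if_false, ih, List.all_cons]
      simp

theorem pvPass_eq (sep : Char) (segs : List (List Char)) : ∀ acc,
    pvPass sep acc segs =
      if segs.all (fun s => (pvSplitP (· == sep) s).all (fun t => !t.isEmpty)) then
        some (acc ++ segs.flatMap (fun s => pvSplitP (· == sep) s))
      else none := by
  induction segs with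
  | nil => intro acc; simp [pvPass]
  | cons sec rest ih =>
    intro acc
    simp only [pvPass, pvSplitOn_eq, pvInner_eq]
    by_cases h : (pvSplitP (· == sep) sec).all (fun t => !t.isEmpty)
    · simp [h, ih, List.append_assoc]
    · simp [h]

-- the state machine computes 'every segment of the combined split is nonempty alphanumeric'
theorem pvScan_spec (cs : List Char) :
    (pvScan true cs = (pvSplitP (fun c => c == '_' || c == '.') cs).all PySem.Chars.strIsalnum) ∧
    (pvScan false cs =
      ((pvSplitP (fun c => c == '_' || c == '.') cs).headI.all PySem.Chars.isalnum
        && ((pvSplitP (fun c => c == '_' || c == '.') cs).tail.all PySem.Chars.strIsalnum))) := by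
  induction cs with
  | nil => simp [pvScan, pvSplitP, PySem.Chars.strIsalnum]
  | cons c t ih =>
    by_cases hs : (c == '_' || c == '.') = true
    · constructor
      · simp [pvScan, hs, pvSplitP, PySem.Chars.strIsalnum]
      · simp [pvScan, hs, pvSplitP, ih.1]
    · rcases h1 : pvSplitP (fun c => c == '_' || c == '.') t with _ | ⟨h, r⟩
      · exact absurd h1 (pvSplitP_ne_nil _ _)
      by_cases ha : PySem.Chars.isalnum c
      · constructor
        · simp only [pvScan, hs, Bool.false_eq_true, if_false, ha, Bool.not_true,
            pvSplitP, List.all_cons, ih.2, h1, List.headI, List.tail]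
          simp [PySem.Chars.strIsalnum, ha]
        · simp only [pvScan, hs, Bool.false_eq_true, if_false, ha, Bool.not_true,
            pvSplitP, ih.2, h1, List.headI, List.tail]
          simp [ha]
      · constructor
        · simp only [pvScan, hs, Bool.false_eq_true, if_false, ha, pvSplitP, h1]
          simp [PySem.Chars.strIsalnum, ha]
        · simp only [pvScan, hs, Bool.false_eq_true, if_false, ha, pvSplitP, h1,
            List.headI, List.tail]
          simp [ha]

theorem pvMain (word : String) (hpre : word ≠ "") :
    is_alpha_numeric_py word = is_alpha_numeric_py_alt word := by
  have hl : word.toList ≠ [] := by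
    intro h; exact hpre (by rwa [← String.toList_eq_nil_iff])
  rcases hcs : word.toList with _ | ⟨c0, t⟩
  · exact absurd hcs hl
  have hget : PySem.Str.pyGet? word 0 = some c0 := by
    simp [PySem.Str.pyGet?, PySem.List.pyGet?, PySem.List.pyIdx?, hcs]
  by_cases hA : PySem.Chars.isalpha c0
  · -- the interesting case
    have halnum : PySem.Chars.isalnum c0 = true := by
      simp [PySem.Chars.isalnum, hA]
    have hu : c0 ≠ '_' := by rintro rfl; revert hA; decide
    have hd : c0 ≠ '.' := by rintro rfl; revert hA; decide
    have hsep : (c0 == '_' || c0 == '.') = false := by simp [hu, hd]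
    -- abbreviations
    set S1 := pvSplitP (· == '_') (c0 :: t) with hS1
    have hSB : S1.flatMap (pvSplitP (· == '.')) = pvSplitP (fun c => c == '_' || c == '.') (c0 :: t) :=
      pvSplitP_flatMap _ _ _
    set SB := pvSplitP (fun c => c == '_' || c == '.') (c0 :: t) with hSBd
    -- B's value
    rcases ht : pvSplitP (fun c => c == '_' || c == '.') t with _ | ⟨h, r⟩
    · exact absurd ht (pvSplitP_ne_nil _ _)
    have hSBc : SB = (c0 :: h) :: r := by
      simp only [hSBd, pvSplitP, hsep, Bool.false_eq_true, if_false, ht]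
    have hB : pvScan false (c0 :: t) = SB.all PySem.Chars.strIsalnum := by
      rw [(pvScan_spec (c0 :: t)).2, ← hSBd, hSBc]
      simp [PySem.Chars.strIsalnum, halnum]
    -- A's value
    simp only [is_alpha_numeric_py, is_alpha_numeric_py_alt, hget, hA, Bool.not_true,
      Bool.false_eq_true, if_false, hcs, hB]
    rw [pvPass_eq]
    by_cases hE1 : ([c0 :: t] : List (List Char)).all (fun s => (pvSplitP (· == '_') s).all (fun tk => !tk.isEmpty))
    · rw [if_pos hE1]
      simp only [List.nil_append, List.flatMap_cons, List.flatMap_nil, List.append_nil]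
      rw [pvPass_eq]
      by_cases hE2 : S1.all (fun s => (pvSplitP (· == '.') s).all (fun tk => !tk.isEmpty))
      · rw [if_pos (by simpa [hS1] using hE2)]
        simp only [List.nil_append]
        rw [show pvSplitP (· == '_') (c0 :: t) = S1 from rfl]
        rw [hSB]
      · rw [if_neg (by simpa [hS1] using hE2)]
        show false = _
        have hE2' : ∃ s ∈ S1, [] ∈ pvSplitP (· == '.') s := by simpa using hE2
        obtain ⟨s, hsmem, htkmem⟩ := hE2'
        symm; rw [List.all_eq_false]
        refine ⟨[], ?_, by simp [PySem.Chars.strIsalnum]⟩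
        rw [← hSB]; exact List.mem_flatMap.mpr ⟨s, hsmem, htkmem⟩
    · rw [if_neg hE1]
      show false = _
      have hE1' : [] ∈ pvSplitP (· == '_') (c0 :: t) := by simpa using hE1
      symm; rw [List.all_eq_false]
      refine ⟨[], ?_, by simp [PySem.Chars.strIsalnum]⟩
      rw [← hSB]
      exact List.mem_flatMap.mpr ⟨[], hE1', by simp [pvSplitP]⟩
  · simp only [is_alpha_numeric_py, is_alpha_numeric_py_alt, hget]
    simp [hA]

-- ===== VERDICT (by name: the statement is the Claim_ definition above) =====
theorem is_alpha_numeric_py_spec : Claim_equal_is_alpha_numeric_py := by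
  intro word _ hpre
  unfold Spec_is_alpha_numeric_py
  exact pvMain word hpre
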